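-- pv_equiv track=rewrite | github.com/derneueimahaus/SourceThatDeal | campaign_engine.py | guess_column_match
-- ===== SOURCE A (Python) =====
-- def guess_column_match(field_name: str, columns: list[str]) -> str | None:
--     """Try to match a template field to a column by name similarity."""
--     field_lower = field_name.lower()
--     for col in columns:
--         if col.lower() == field_lower:
--             return col
--     for col in columns:
--         if field_lower in col.lower() or col.lower() in field_lower:
--             return col
--     return None
-- ===== SOURCE B (Python) =====
-- def guess_column_match(field_name: str, columns: list[str]) -> str | None:
--     """Single pass: exact match returns immediately; otherwise remember the
--     first substring-similar column and return it after the scan."""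
--     field_lower = field_name.lower()
--     candidate = None
--     for col in columns:
--         col_lower = col.lower()
--         if col_lower == field_lower:
--             return col
--         if candidate is None and (field_lower in col_lower or col_lower in field_lower):
--             candidate = col
--     return candidate
-- ===== Notes on version B (the rewrite author's own statement) =====
-- stated objective: alternative
-- what changed: Replaces A's two sequential scans over columns (exact pass then substring pass) by one single pass that returns an exact match immediately and otherwise remembers the first substring candidate.
import Mathlib
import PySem

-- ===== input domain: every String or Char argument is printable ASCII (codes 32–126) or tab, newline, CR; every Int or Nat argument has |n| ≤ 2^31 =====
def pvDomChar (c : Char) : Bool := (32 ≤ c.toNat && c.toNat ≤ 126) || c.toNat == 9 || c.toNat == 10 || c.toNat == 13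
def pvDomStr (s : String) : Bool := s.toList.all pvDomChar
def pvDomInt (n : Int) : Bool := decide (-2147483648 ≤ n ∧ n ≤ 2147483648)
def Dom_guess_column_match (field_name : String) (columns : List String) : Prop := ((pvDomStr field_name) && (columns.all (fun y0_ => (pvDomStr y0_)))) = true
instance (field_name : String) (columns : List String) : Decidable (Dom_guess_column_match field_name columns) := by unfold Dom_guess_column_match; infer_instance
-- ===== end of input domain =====

-- B does one pass instead of A's two passes; same return value (alternative decomposition, not faster).

-- ===== PORT A =====
-- A: first scan for an exact (case-insensitive) match, then a second scan for a substring match.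
def guess_column_match (field_name : String) (columns : List String) : Option String :=
  let field_lower := PySem.Str.lower field_name
  match columns.find? (fun col => PySem.Str.lower col == field_lower) with
  | some col => some col
  | none =>
      columns.find? (fun col =>
        PySem.Str.isIn field_lower (PySem.Str.lower col) || PySem.Str.isIn (PySem.Str.lower col) field_lower)

-- ===== PORT B =====
-- B: single pass keeping the first substring candidate; exact match returns immediately.
def guessAltGo (field_lower : String) (candidate : Option String) : List String → Option String
  | [] => candidate
  | col :: rest =>
      let col_lower := PySem.Str.lower col
      if col_lower == field_lower then some col
      else if candidate.isNone &&
          (PySem.Str.isIn field_lower col_lower || PySem.Str.isIn col_lower field_lower) then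
        guessAltGo field_lower (some col) rest
      else
        guessAltGo field_lower candidate rest

def guess_column_match_alt (field_name : String) (columns : List String) : Option String :=
  guessAltGo (PySem.Str.lower field_name) none columns

-- ===== PRECONDITION & SPEC =====
def Spec_guess_column_match (field_name : String) (columns : List String) (out : Option String) : Prop := out = guess_column_match_alt field_name columns
instance (field_name : String) (columns : List String) (out : Option String) : Decidable (Spec_guess_column_match field_name columns out) := by unfold Spec_guess_column_match; infer_instance

-- ===== CLAIM (what is proved, stated in full; the proofs are below) =====
def Claim_equal_guess_column_match : Prop := ∀ (field_name : String) (columns : List String), Dom_guess_column_match field_name columns → Spec_guess_column_match field_name columns (guess_column_match field_name columns)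

-- ===== LEMMAS AND PROOFS =====

-- Loop invariant: the single pass equals "first exact match, else the stored candidate, else first substring match".
theorem guessAltGo_eq (fl : String) (cand : Option String) (cols : List String) :
    guessAltGo fl cand cols =
      match cols.find? (fun col => PySem.Str.lower col == fl) with
      | some col => some col
      | none => cand.or (cols.find? (fun col =>
          PySem.Str.isIn fl (PySem.Str.lower col) || PySem.Str.isIn (PySem.Str.lower col) fl)) := by
  induction cols generalizing cand with
  | nil => cases cand <;> rfl
  | cons col rest ih =>
    simp only [guessAltGo, List.find?]
    by_cases hexact : (PySem.Str.lower col == fl) = true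
    · simp [hexact]
    · simp only [hexact, Bool.false_eq_true, if_false]
      by_cases hsub : (PySem.Str.isIn fl (PySem.Str.lower col) || PySem.Str.isIn (PySem.Str.lower col) fl) = true
      · cases cand with
        | none =>
          simp only [hsub, Option.isNone_none, Bool.true_and, if_true]
          rw [ih]
          cases List.find? (fun col => PySem.Str.lower col == fl) rest <;> rfl
        | some c =>
          simp only [hsub, Option.isNone_some, Bool.false_and, Bool.false_eq_true, if_false]
          rw [ih]
          cases List.find? (fun col => PySem.Str.lower col == fl) rest <;> rfl
      · rw [Bool.not_eq_true] at hsub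
        simp only [hsub, Bool.and_false, Bool.false_eq_true, if_false]
        rw [ih]

-- ===== VERDICT (by name: the statement is the Claim_ definition above) =====
theorem guess_column_match_spec : Claim_equal_guess_column_match := by
  intro field_name columns _
  unfold Spec_guess_column_match guess_column_match guess_column_match_alt
  rw [guessAltGo_eq]
  cases h : columns.find? (fun col => PySem.Str.lower col == PySem.Str.lower field_name) <;>
    simp [h, Option.or]
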